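-- pv_equiv track=rewrite | github.com/anaschwendler/everyday-exercise | python/matrix/matrix.py | __define_columns
-- ===== SOURCE A (Python) =====
-- def __define_columns(matrix_string):
--     split_lines = matrix_string.splitlines()
--     columns = {}
--     for i in split_lines:
--         split = i.split()
--         k = 1
--         for j in split:
--           if k not in columns:
--               columns[k] = []
--           columns[k].append(int(j))
--           k += 1
--     return columns
-- ===== SOURCE B (Python) =====
-- def __define_columns(matrix_string):
--     rows = [[int(tok) for tok in line.split()] for line in matrix_string.splitlines()]
--     width = max((len(row) for row in rows), default=0)
--     return {k: [row[k - 1] for row in rows if len(row) >= k]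
--             for k in range(1, width + 1)}
-- ===== Notes on version B (the rewrite author's own statement) =====
-- stated objective: alternative
-- what changed: A mutates a dict row-major, appending each parsed number to its column as it scans; B parses all rows first, then builds the dict column-major in one comprehension over column indices 1..max row length.
import Mathlib
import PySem

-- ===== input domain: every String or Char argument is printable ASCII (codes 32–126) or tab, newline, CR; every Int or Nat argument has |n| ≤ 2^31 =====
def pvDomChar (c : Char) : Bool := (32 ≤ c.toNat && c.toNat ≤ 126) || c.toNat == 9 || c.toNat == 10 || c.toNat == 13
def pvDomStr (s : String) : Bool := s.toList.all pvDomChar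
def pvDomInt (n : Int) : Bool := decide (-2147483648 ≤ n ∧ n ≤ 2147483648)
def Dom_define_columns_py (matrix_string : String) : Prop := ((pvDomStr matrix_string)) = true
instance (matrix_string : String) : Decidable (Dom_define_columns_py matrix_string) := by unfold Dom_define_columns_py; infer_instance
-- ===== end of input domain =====

-- B builds the dict column-major from pre-parsed rows instead of A's row-major incremental dict mutation; same result, same cost (objective: alternative).

-- ===== PORT A =====
-- `columns[k].append(int(j))` right after ensuring the key exists is Dict.modify with default [] (exact: d[k] = d.get(k, []) + [int(j)]).
def define_columns_py (matrix_string : String) : List (Int × List Int) :=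
  let split_lines := PySem.Str.splitlines matrix_string
  let columns : PySem.Dict Int (List Int) :=
    split_lines.foldl (fun columns i =>
      let split := PySem.Str.split₀ i
      (split.foldl (fun (st : PySem.Dict Int (List Int) × Int) j =>
          let columns := if st.1.contains st.2 then st.1 else st.1.insert st.2 []
          (columns.modify st.2 [] (fun v => v ++ [(PySem.Int.ofStr? j).getD 0]), st.2 + 1))
        (columns, 1)).1)
      PySem.Dict.empty
  columns.items

-- ===== PORT B =====
def define_columns_py_alt (matrix_string : String) : List (Int × List Int) :=
  let rows := (PySem.Str.splitlines matrix_string).map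
      (fun line => (PySem.Str.split₀ line).map (fun tok => (PySem.Int.ofStr? tok).getD 0))
  let width := PySem.List.maxD (rows.map (fun row => (row.length : Int))) id 0
  (PySem.List.pyRange 1 (width + 1) 1).map (fun k =>
    (k, (rows.filter (fun row => decide (k ≤ (row.length : Int)))).map
          (fun row => (PySem.List.pyGet? row (k - 1)).getD 0)))

-- ===== PRECONDITION & SPEC =====
-- Pre_ excludes exactly the inputs on which some whitespace-separated token is not a valid int literal: there Python's int() raises ValueError (in A and in B alike).
def Pre_define_columns_py (matrix_string : String) : Prop :=
  ∀ line ∈ PySem.Str.splitlines matrix_string, ∀ tok ∈ PySem.Str.split₀ line,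
    (PySem.Int.ofStr? tok).isSome = true
instance (matrix_string : String) : Decidable (Pre_define_columns_py matrix_string) := by
  unfold Pre_define_columns_py; infer_instance

def pvWitness_define_columns_py : String := "1 2 3\n4 5\n6 7 8 9"

def Spec_define_columns_py (matrix_string : String) (out : List (Int × List Int)) : Prop := out = define_columns_py_alt matrix_string
instance (matrix_string : String) (out : List (Int × List Int)) : Decidable (Spec_define_columns_py matrix_string out) := by unfold Spec_define_columns_py; infer_instance

-- ===== CLAIM (what is proved, stated in full; the proofs are below) =====
def Claim_equal_define_columns_py : Prop := ∀ (matrix_string : String), Dom_define_columns_py matrix_string → Pre_define_columns_py matrix_string → Spec_define_columns_py matrix_string (define_columns_py matrix_string)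

-- ===== LEMMAS AND PROOFS =====

-- proof-side helpers: the parsed rows, A's two loop bodies, the column picture of the dict
def pvParseRow (line : String) : List Int :=
  (PySem.Str.split₀ line).map (fun tok => (PySem.Int.ofStr? tok).getD 0)

def pvRows (s : String) : List (List Int) := (PySem.Str.splitlines s).map pvParseRow

def pvInner (st : PySem.Dict Int (List Int) × Int) (v : Int) : PySem.Dict Int (List Int) × Int :=
  let columns := if st.1.contains st.2 then st.1 else st.1.insert st.2 []
  (columns.modify st.2 [] (fun w => w ++ [v]), st.2 + 1)

def pvStep (d : PySem.Dict Int (List Int)) (r : List Int) : PySem.Dict Int (List Int) :=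
  (r.foldl pvInner (d, 1)).1

def pvW (rows : List (List Int)) : Nat := rows.foldl (fun m r => max m r.length) 0

def pvColF (rows : List (List Int)) (i : Nat) : List Int :=
  (rows.filter (fun r => decide (i < r.length))).map (fun r => r.getD i 0)

-- the canonical dict whose keys are 1..W and whose value at key i+1 is c i
def pvD (W : Nat) (c : Nat → List Int) : PySem.Dict Int (List Int) :=
  PySem.Dict.mk ((List.range W).map (fun (i : Nat) => ((i : Int) + 1, c i)))

lemma pv_contains (W : Nat) (c : Nat → List Int) (t : Nat) :
    (pvD W c).contains ((t : Int) + 1) = decide (t < W) := by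
  simp only [pvD, PySem.Dict.contains, List.any_map, Function.comp_def]
  by_cases h : t < W
  · simp only [h, decide_true, List.any_eq_true]
    exact ⟨t, List.mem_range.mpr h, by simp⟩
  · simp only [h, decide_false, List.any_eq_false]
    intro i hi
    have hi' := List.mem_range.mp hi
    simp only [beq_iff_eq]
    omega

lemma pv_find_range (t W : Nat) : List.find? (fun i => i == t) (List.range W)
    = if t < W then some t else none := by
  induction W with
  | zero => simp
  | succ n ih =>
    rw [List.range_succ, List.find?_append, ih]
    by_cases h : t < n
    · simp [h, Nat.lt_succ_of_lt h]
    · by_cases h2 : t = n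
      · subst h2; simp
      · have : ¬ t < n + 1 := by omega
        simp [h, this, Ne.symm h2]

lemma pv_keyfun (t : Nat) :
    (fun (i : Nat) => ((i:Int) + 1 == (t:Int) + 1)) = (fun i => (i == t)) := by
  funext i
  by_cases h : i = t
  · simp [h]
  · have h1 : (i == t) = false := by simp [h]
    rw [h1]
    simp only [beq_eq_false_iff_ne, ne_eq]
    omega

lemma pv_get? (W : Nat) (c : Nat → List Int) (t : Nat) (ht : t < W) :
    (pvD W c).get? ((t : Int) + 1) = some (c t) := by
  simp only [pvD, PySem.Dict.get?, List.find?_map, Function.comp_def]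
  rw [pv_keyfun, pv_find_range, if_pos ht]
  rfl

lemma pv_insert_lt (W : Nat) (c : Nat → List Int) (t : Nat) (v : List Int) (ht : t < W) :
    (pvD W c).insert ((t : Int) + 1) v = pvD W (fun i => if i = t then v else c i) := by
  have hcon : (pvD W c).contains ((t:Int)+1) = true := by
    rw [pv_contains]; simp [ht]
  simp only [PySem.Dict.insert, hcon, if_pos]
  apply PySem.Dict.ext
  simp only [pvD, List.map_map, Function.comp_def]
  apply List.map_congr_left
  intro i hi
  by_cases h : i = t
  · simp [h]
  · have h1 : ((i:Int) + 1 == (t:Int) + 1) = false := by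
      simp only [beq_eq_false_iff_ne, ne_eq]; omega
    simp [h1, h]

lemma pv_insert_eq (W : Nat) (c : Nat → List Int) (v : List Int) :
    (pvD W c).insert ((W : Int) + 1) v = pvD (W + 1) (fun i => if i = W then v else c i) := by
  have hcon : (pvD W c).contains ((W:Int)+1) = false := by
    rw [pv_contains]; simp
  simp only [PySem.Dict.insert, hcon, Bool.false_eq_true, if_false]
  apply PySem.Dict.ext
  simp only [pvD, List.range_succ, List.map_append]
  congr 1
  · apply List.map_congr_left
    intro i hi
    have := List.mem_range.mp hi
    simp [Nat.ne_of_lt this]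
  · simp

lemma pv_inner_step (W : Nat) (c : Nat → List Int) (t : Nat) (v : Int)
    (ht : t ≤ W) (hc : ∀ i, W ≤ i → c i = []) :
    pvInner (pvD W c, (t : Int) + 1) v
      = (pvD (max W (t + 1)) (fun i => if i = t then c t ++ [v] else c i), (t : Int) + 1 + 1) := by
  rcases Nat.lt_or_ge t W with h | h
  · have hcon : (pvD W c).contains ((t:Int)+1) = true := by rw [pv_contains]; simp [h]
    have hmax : max W (t+1) = W := by omega
    simp only [pvInner, hcon, if_pos, PySem.Dict.modify, PySem.Dict.getD, pv_get? W c t h,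
      Option.getD_some, pv_insert_lt W c t _ h, hmax]
  · have hW : t = W := by omega
    subst hW
    have hcon : (pvD t c).contains ((t:Int)+1) = false := by rw [pv_contains]; simp
    have hct : c t = [] := hc t (le_refl t)
    have hmax : max t (t+1) = t + 1 := by omega
    simp only [pvInner, hcon, Bool.false_eq_true, if_false]
    rw [pv_insert_eq]
    have heq : (fun i => if i = t then ([] : List Int) else c i) = c := by
      funext i
      by_cases h2 : i = t
      · subst h2; simp [hct]
      · simp [h2]
    rw [heq]
    have hlt : t < t + 1 := by omega
    simp only [PySem.Dict.modify, PySem.Dict.getD, pv_get? (t+1) c t hlt, Option.getD_some,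
      pv_insert_lt (t+1) c t _ hlt, hmax, hct]

lemma pv_inner_fold (r : List Int) : ∀ (t W : Nat) (c : Nat → List Int),
    t ≤ W → (∀ i, W ≤ i → c i = []) →
    (r.foldl pvInner (pvD W c, (t : Int) + 1)).1
      = pvD (max W (t + r.length))
          (fun i => if t ≤ i ∧ i < t + r.length then c i ++ [r.getD (i - t) 0] else c i) := by
  induction r with
  | nil =>
    intro t W c ht hc
    have h1 : max W (t + 0) = W := by omega
    simp only [List.foldl_nil, List.length_nil, h1]
    congr 1
    funext i
    simp
  | cons v rr ih =>
    intro t W c ht hc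
    rw [List.foldl_cons, pv_inner_step W c t v ht hc]
    have h2 : ((t:Int) + 1 + 1) = ((t+1 : Nat) : Int) + 1 := by push_cast; ring
    rw [h2, ih (t+1) (max W (t+1)) _ (by omega) ?_]
    · have hW : max (max W (t+1)) (t + 1 + rr.length) = max W (t + (v :: rr).length) := by
        simp only [List.length_cons]; omega
      rw [hW]
      congr 1
      funext i
      simp only [List.length_cons]
      split_ifs <;>
        first
          | rfl
          | (exfalso; omega)
          | (congr 2
             rw [show i - t = (i - (t+1)) + 1 by omega, List.getD_cons_succ])
          | simp_all
    · intro i hi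
      by_cases h5 : i = t
      · omega
      · simp only [h5, if_false]
        exact hc i (by omega)

lemma pv_step_spec (W : Nat) (c : Nat → List Int) (r : List Int) (hc : ∀ i, W ≤ i → c i = []) :
    pvStep (pvD W c) r
      = pvD (max W r.length) (fun i => if i < r.length then c i ++ [r.getD i 0] else c i) := by
  have h0 : ((1 : Int)) = ((0 : Nat) : Int) + 1 := by norm_num
  unfold pvStep
  rw [h0, pv_inner_fold r 0 W c (Nat.zero_le W) hc]
  simp

lemma pv_le_foldl_max (rows : List (List Int)) : ∀ (m : Nat),
    m ≤ rows.foldl (fun m r => max m r.length) m := by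
  induction rows with
  | nil => simp
  | cons r rs ih =>
    intro m
    simp only [List.foldl_cons]
    exact le_trans (Nat.le_max_left m r.length) (ih _)

lemma pv_len_le_W (rows : List (List Int)) : ∀ (r : List Int), r ∈ rows →
    ∀ m, r.length ≤ rows.foldl (fun m r => max m r.length) m := by
  induction rows with
  | nil => intro r hr; cases hr
  | cons x rs ih =>
    intro r hr m
    simp only [List.foldl_cons]
    rcases List.mem_cons.mp hr with h | h
    · subst h
      exact le_trans (Nat.le_max_right m r.length) (pv_le_foldl_max rs _)
    · exact ih r h _

lemma pv_colF_nil (rows : List (List Int)) (i : Nat) (hi : pvW rows ≤ i) :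
    pvColF rows i = [] := by
  unfold pvColF
  rw [List.filter_eq_nil_iff.mpr, List.map_nil]
  intro r hr
  have := pv_len_le_W rows r hr 0
  simp only [decide_eq_true_eq]
  unfold pvW at hi
  omega

lemma pv_dict_spec (rows : List (List Int)) :
    rows.foldl pvStep PySem.Dict.empty = pvD (pvW rows) (pvColF rows) := by
  induction rows using List.reverseRecOn with
  | nil => rfl
  | append_singleton rs r ih =>
    rw [List.foldl_append, List.foldl_cons, List.foldl_nil, ih,
      pv_step_spec _ _ r (fun i hi => pv_colF_nil rs i hi)]
    have hW : pvW (rs ++ [r]) = max (pvW rs) r.length := by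
      unfold pvW
      rw [List.foldl_append]
      rfl
    rw [hW]
    congr 1
    funext i
    unfold pvColF
    rw [List.filter_append, List.map_append]
    by_cases h : i < r.length
    · simp [h]
    · simp [h]

lemma pv_A_eq (s : String) :
    define_columns_py s = (pvD (pvW (pvRows s)) (pvColF (pvRows s))).items := by
  rw [← pv_dict_spec]
  simp only [define_columns_py, pvRows, List.foldl_map, pvStep, pvParseRow, pvInner]

lemma pv_maxD_W (rows : List (List Int)) :
    PySem.List.maxD (rows.map (fun row => (row.length : Int))) id 0 = (pvW rows : Int) := by
  unfold PySem.List.maxD PySem.List.max? pvW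
  cases rows with
  | nil => rfl
  | cons r rs =>
    simp only [List.map_cons, List.foldl_cons, List.foldl_map, id, Nat.zero_max]
    generalize r.length = m
    induction rs generalizing m with
    | nil => simp
    | cons x rs ih =>
      simp only [List.foldl_cons]
      rcases Nat.lt_or_ge m x.length with h | h
      · have h1 : ((m:Int) < (x.length:Int)) := by exact_mod_cast h
        rw [if_pos h1, show max m x.length = x.length by omega]
        exact ih x.length
      · have h1 : ¬ ((m:Int) < (x.length:Int)) := by exact_mod_cast Nat.not_lt.mpr h
        rw [if_neg h1, show max m x.length = m by omega]
        exact ih m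

lemma pv_pyRange_range (W : Nat) :
    PySem.List.pyRange 1 ((W : Int) + 1) 1 = (List.range W).map (fun (i : Nat) => ((i : Int) + 1)) := by
  induction W with
  | zero => rfl
  | succ n ih =>
    have h1 : (1 : Int) ≤ (n : Int) + 1 := by omega
    have h2 : ((n + 1 : Nat) : Int) + 1 = ((n : Int) + 1) + 1 := by push_cast; ring
    rw [h2, PySem.List.pyRange_one_succ_right h1, ih, List.range_succ, List.map_append]
    simp

lemma pv_B_eq (s : String) :
    define_columns_py_alt s = (pvD (pvW (pvRows s)) (pvColF (pvRows s))).items := by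
  simp only [define_columns_py_alt]
  rw [show ((PySem.Str.splitlines s).map
      (fun line => (PySem.Str.split₀ line).map (fun tok => (PySem.Int.ofStr? tok).getD 0)))
      = pvRows s from rfl]
  rw [pv_maxD_W, pv_pyRange_range, List.map_map]
  unfold pvD
  apply List.map_congr_left
  intro i hi
  refine Prod.ext rfl ?_
  show (((pvRows s).filter (fun row => decide ((i:Int)+1 ≤ (row.length:Int)))).map
      (fun row => (PySem.List.pyGet? row ((i:Int)+1-1)).getD 0)) = pvColF (pvRows s) i
  have hp : (fun (row : List Int) => decide ((i:Int)+1 ≤ (row.length:Int)))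
      = (fun (row : List Int) => decide (i < row.length)) := by
    funext row
    rw [decide_eq_decide]
    omega
  rw [hp]
  unfold pvColF
  apply List.map_congr_left
  intro row hrow
  have hlen : i < row.length := by
    have := (List.mem_filter.mp hrow).2
    simpa using this
  have h1 : ((i:Int)+1-1) = (i:Int) := by ring
  rw [h1]
  simp [PySem.List.pyGet?, PySem.List.pyIdx?, hlen, List.getD]

-- ===== VERDICT (by name: the statement is the Claim_ definition above) =====
theorem define_columns_py_spec : Claim_equal_define_columns_py := by
  intro s _ _
  unfold Spec_define_columns_py
  rw [pv_A_eq, pv_B_eq]
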